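-- pv_equiv track=rewrite | github.com/ofenske/pasigram | pasigram/controller/csp/utils.py | has_child
-- ===== SOURCE A (Python) =====
-- def has_child(outgoing_neighbours: list, ingoing_neighbours: list, child_node_id: int) -> [bool, str]:
--     """Check which direction the edge has, which connects the neighbour node to the current one.
--
--     :param list outgoing_neighbours: All outgoing neighbours of the current node
--     :param list ingoing_neighbours: All ingoing neighbours of the current node
--     :param child_node_id: The id of the child node for which one want to check the edge direction
--     :return: 'outgoing_neighbour' if it is a forward edge and 'ingoing_neighbour' if it is a backward edge
--     :rtype: str
--     """
--     child = False
--     edge_direction = None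
--     if len(outgoing_neighbours) > len(ingoing_neighbours):
--         iteration_length = len(outgoing_neighbours)
--     else:
--         iteration_length = len(ingoing_neighbours)
--
--     for i in range(0, iteration_length):
--         if i < len(outgoing_neighbours):
--             outgoing_neighbour_node_id = outgoing_neighbours[i][2]
--             if outgoing_neighbour_node_id == child_node_id:
--                 child = True
--                 edge_direction = "outgoing_neighbours"
--
--         if i < len(ingoing_neighbours):
--             ingoing_neighbour_node_id = ingoing_neighbours[i][2]
--             if ingoing_neighbour_node_id == child_node_id:
--                 child = True
--                 edge_direction = "ingoing_neighbours"
--     return child, edge_direction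
-- ===== SOURCE B (Python) =====
-- def has_child(outgoing_neighbours: list, ingoing_neighbours: list, child_node_id: int) -> [bool, str]:
--     """Check which direction the edge has, which connects the neighbour node to
--     the current one."""
--     if any(entry[2] == child_node_id for entry in outgoing_neighbours):
--         return True, "outgoing_neighbours"
--     if any(entry[2] == child_node_id for entry in ingoing_neighbours):
--         return True, "ingoing_neighbours"
--     return False, None
-- ===== Notes on version B (the rewrite author's own statement) =====
-- stated objective: simpler
-- what changed: Replaces the interleaved padded index loop carrying mutable last-match state with two short-circuit membership tests; Pre_ excludes inputs where the child id occurs in BOTH lists, on which A's answer is an accident of which match has the later index (ingoing winning ties).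
import Mathlib
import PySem

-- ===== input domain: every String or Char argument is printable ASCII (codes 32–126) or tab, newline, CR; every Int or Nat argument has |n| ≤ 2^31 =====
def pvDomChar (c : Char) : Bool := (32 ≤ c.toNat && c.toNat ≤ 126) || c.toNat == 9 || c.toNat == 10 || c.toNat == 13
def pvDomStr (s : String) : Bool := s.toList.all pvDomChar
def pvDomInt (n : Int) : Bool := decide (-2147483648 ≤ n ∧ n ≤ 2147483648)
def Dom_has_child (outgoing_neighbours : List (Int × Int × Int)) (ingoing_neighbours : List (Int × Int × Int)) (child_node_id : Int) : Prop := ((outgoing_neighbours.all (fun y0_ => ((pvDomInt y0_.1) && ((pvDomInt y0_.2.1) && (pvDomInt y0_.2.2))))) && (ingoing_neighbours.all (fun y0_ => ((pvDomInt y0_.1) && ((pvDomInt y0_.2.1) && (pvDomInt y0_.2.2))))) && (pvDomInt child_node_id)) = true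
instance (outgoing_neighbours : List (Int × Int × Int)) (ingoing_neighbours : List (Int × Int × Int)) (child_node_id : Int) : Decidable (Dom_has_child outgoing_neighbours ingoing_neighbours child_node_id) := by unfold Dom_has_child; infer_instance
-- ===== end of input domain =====

-- B replaces the interleaved padded index loop with two short-circuit membership
-- tests; objective: simpler.

-- ===== PORT A =====
-- literal port of A: one loop over range(0, max(len,len)) carrying (child, edge_direction);
-- the i < len guards make the in-range indexings total, so getD is exact here
def has_child (outgoing_neighbours : List (Int × Int × Int)) (ingoing_neighbours : List (Int × Int × Int)) (child_node_id : Int) : Bool × Option String :=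
  let iteration_length : Nat :=
    if outgoing_neighbours.length > ingoing_neighbours.length then outgoing_neighbours.length
    else ingoing_neighbours.length
  (List.range iteration_length).foldl (fun st i =>
    let st1 :=
      if i < outgoing_neighbours.length then
        (if (outgoing_neighbours.getD i (0, 0, 0)).2.2 = child_node_id then
          (true, some "outgoing_neighbours") else st)
      else st
    if i < ingoing_neighbours.length then
      (if (ingoing_neighbours.getD i (0, 0, 0)).2.2 = child_node_id then
        (true, some "ingoing_neighbours") else st1)
    else st1)
    (false, none)

-- ===== PORT B =====
def has_child_alt (outgoing_neighbours : List (Int × Int × Int)) (ingoing_neighbours : List (Int × Int × Int)) (child_node_id : Int) : Bool × Option String :=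
  if outgoing_neighbours.any (fun entry => entry.2.2 = child_node_id) then
    (true, some "outgoing_neighbours")
  else if ingoing_neighbours.any (fun entry => entry.2.2 = child_node_id) then
    (true, some "ingoing_neighbours")
  else (false, none)

-- ===== PRECONDITION & SPEC =====
-- Pre_ excludes inputs where the child id occurs in BOTH lists: there A's answer is an
-- accident of which match has the later index (ingoing winning ties), a corner where
-- either direction is as defensible as the other.
def Pre_has_child (outgoing_neighbours : List (Int × Int × Int)) (ingoing_neighbours : List (Int × Int × Int)) (child_node_id : Int) : Prop :=
  ¬ (outgoing_neighbours.any (fun entry => entry.2.2 = child_node_id) = true ∧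
     ingoing_neighbours.any (fun entry => entry.2.2 = child_node_id) = true)
instance (outgoing_neighbours : List (Int × Int × Int)) (ingoing_neighbours : List (Int × Int × Int)) (child_node_id : Int) : Decidable (Pre_has_child outgoing_neighbours ingoing_neighbours child_node_id) := by unfold Pre_has_child; infer_instance

def pvWitness_has_child : (List (Int × Int × Int)) × (List (Int × Int × Int)) × Int := ([(0, 0, 1)], [(2, 3, 4)], 1)

def Spec_has_child (outgoing_neighbours : List (Int × Int × Int)) (ingoing_neighbours : List (Int × Int × Int)) (child_node_id : Int) (out : Bool × Option String) : Prop := out = has_child_alt outgoing_neighbours ingoing_neighbours child_node_id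
instance (outgoing_neighbours : List (Int × Int × Int)) (ingoing_neighbours : List (Int × Int × Int)) (child_node_id : Int) (out : Bool × Option String) : Decidable (Spec_has_child outgoing_neighbours ingoing_neighbours child_node_id out) := by unfold Spec_has_child; infer_instance

-- ===== CLAIM (what is proved, stated in full; the proofs are below) =====
def Claim_equal_has_child : Prop := ∀ (outgoing_neighbours : List (Int × Int × Int)) (ingoing_neighbours : List (Int × Int × Int)) (child_node_id : Int), Dom_has_child outgoing_neighbours ingoing_neighbours child_node_id → Pre_has_child outgoing_neighbours ingoing_neighbours child_node_id → Spec_has_child outgoing_neighbours ingoing_neighbours child_node_id (has_child outgoing_neighbours ingoing_neighbours child_node_id)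

-- ===== LEMMAS AND PROOFS =====

-- last matching index among indices < n, -1 if none (a description of A's loop state)
def lastB (xs : List (Int × Int × Int)) (c : Int) : Nat → Int
  | 0 => -1
  | n + 1 => if n < xs.length ∧ (xs.getD n (0, 0, 0)).2.2 = c then (n : Int) else lastB xs c n

def combineIdx (o i : Int) : Bool × Option String :=
  if o = -1 ∧ i = -1 then (false, none)
  else if i ≥ o then (true, some "ingoing_neighbours")
  else (true, some "outgoing_neighbours")

theorem lastB_lt (xs : List (Int × Int × Int)) (c : Int) (n : Nat) : lastB xs c n < (n : Int) := by
  induction n with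
  | zero => simp [lastB]
  | succ n ih =>
    simp only [lastB]
    split_ifs with h
    · omega
    · push_cast; omega

theorem lastB_ge (xs : List (Int × Int × Int)) (c : Int) (n : Nat) : -1 ≤ lastB xs c n := by
  induction n with
  | zero => simp [lastB]
  | succ n ih =>
    simp only [lastB]
    split_ifs with h
    · omega
    · exact ih

theorem lastB_neg1_iff (xs : List (Int × Int × Int)) (c : Int) (n : Nat) :
    lastB xs c n = -1 ↔ ∀ k, k < n → k < xs.length → (xs.getD k (0, 0, 0)).2.2 ≠ c := by
  induction n with
  | zero => simp [lastB]
  | succ n ih =>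
    simp only [lastB]
    by_cases h : n < xs.length ∧ (xs.getD n (0, 0, 0)).2.2 = c
    · rw [if_pos h]
      constructor
      · intro he; exfalso; omega
      · intro hall; exact absurd h.2 (hall n (Nat.lt_succ_self n) h.1)
    · rw [if_neg h, ih]
      constructor
      · intro hall k hk hkl hc
        rcases Nat.lt_or_ge k n with hk' | hk'
        · exact hall k hk' hkl hc
        · have hkn : k = n := by omega
          subst hkn; exact h ⟨hkl, hc⟩
      · intro hall k hk hkl; exact hall k (by omega) hkl

theorem any_iff_lastB (xs : List (Int × Int × Int)) (c : Int) :
    xs.any (fun entry => entry.2.2 = c) = true ↔ ¬ lastB xs c xs.length = -1 := by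
  rw [lastB_neg1_iff]
  simp only [List.any_eq_true, decide_eq_true_eq, List.mem_iff_getElem]
  constructor
  · rintro ⟨e, ⟨k, hk, he⟩, hc⟩ hall
    exact hall k hk hk (by simp [List.getD, List.getElem?_eq_getElem hk, he, hc])
  · intro h
    push Not at h
    obtain ⟨k, _, hkl, hc⟩ := h
    exact ⟨xs[k], ⟨k, hkl, rfl⟩, by
      simpa [List.getD, List.getElem?_eq_getElem hkl] using hc⟩

theorem foldl_range_eq (o i_ : List (Int × Int × Int)) (c : Int) (n : Nat) :
    (List.range n).foldl (fun st i =>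
      let st1 :=
        if i < o.length then
          (if (o.getD i (0, 0, 0)).2.2 = c then (true, some "outgoing_neighbours") else st)
        else st
      if i < i_.length then
        (if (i_.getD i (0, 0, 0)).2.2 = c then (true, some "ingoing_neighbours") else st1)
      else st1)
      (false, none) = combineIdx (lastB o c n) (lastB i_ c n) := by
  induction n with
  | zero => rfl
  | succ n ih =>
    rw [List.range_succ, List.foldl_append, ih]
    simp only [List.foldl_cons, List.foldl_nil, lastB, combineIdx]
    have ho1 := lastB_lt o c n
    have ho2 := lastB_ge o c n
    have hi1 := lastB_lt i_ c n
    have hi2 := lastB_ge i_ c n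
    split_ifs <;> first | rfl | omega | tauto

theorem lastB_stable (xs : List (Int × Int × Int)) (c : Int) (n : Nat) (h : xs.length ≤ n) :
    lastB xs c n = lastB xs c xs.length := by
  induction n with
  | zero =>
    have h0 : xs.length = 0 := by omega
    rw [h0]
  | succ n ih =>
    rcases Nat.lt_or_ge xs.length (n + 1) with h' | h'
    · have : xs.length ≤ n := by omega
      simp only [lastB]
      rw [if_neg (by omega), ih this]
    · have : xs.length = n + 1 := by omega
      rw [this]

-- ===== VERDICT (by name: the statement is the Claim_ definition above) =====
theorem has_child_spec : Claim_equal_has_child := by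
  intro o i_ c _ hpre
  show has_child o i_ c = has_child_alt o i_ c
  unfold has_child has_child_alt
  rw [foldl_range_eq]
  have hL : o.length ≤ (if o.length > i_.length then o.length else i_.length) ∧
      i_.length ≤ (if o.length > i_.length then o.length else i_.length) := by
    split_ifs <;> omega
  rw [lastB_stable o c _ hL.1, lastB_stable i_ c _ hL.2]
  unfold Pre_has_child at hpre
  rw [any_iff_lastB, any_iff_lastB] at hpre
  have ho1 := lastB_ge o c o.length
  have hi1 := lastB_ge i_ c i_.length
  by_cases ho : lastB o c o.length = -1 <;> by_cases hi : lastB i_ c i_.length = -1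
  · have h1 : ¬ (o.any (fun entry => entry.2.2 = c) = true) :=
      fun h => (any_iff_lastB o c).mp h ho
    have h2 : ¬ (i_.any (fun entry => entry.2.2 = c) = true) :=
      fun h => (any_iff_lastB i_ c).mp h hi
    rw [combineIdx, if_pos ⟨ho, hi⟩, if_neg h1, if_neg h2]
  · have h2 : i_.any (fun entry => entry.2.2 = c) = true := (any_iff_lastB i_ c).mpr hi
    have h1 : ¬ (o.any (fun entry => entry.2.2 = c) = true) :=
      fun h => (any_iff_lastB o c).mp h ho
    rw [combineIdx, if_neg (fun hc => hi hc.2), if_pos (by omega), if_neg h1, if_pos h2]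
  · have h1 : o.any (fun entry => entry.2.2 = c) = true := (any_iff_lastB o c).mpr ho
    rw [combineIdx, if_neg (fun hc => ho hc.1), if_neg (by omega), if_pos h1]
  · exact absurd ⟨ho, hi⟩ hpre
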